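-- pv_equiv track=rewrite | github.com/chrhein/metaheuristics | metaheuristics_project/tools/route_handler.py | get_routes_as_list
-- ===== SOURCE A (Python) =====
-- def get_routes_as_list(solution):
--     vehicles = []
--     route = []
--     for i in range(len(solution)):
--         if solution[i] == 0:
--             vehicles.append(route)
--             route = []
--         else:
--             route.append(solution[i])
--     return vehicles
-- ===== SOURCE B (Python) =====
-- def get_routes_as_list(solution):
--     zeros = [i for i, x in enumerate(solution) if x == 0]
--     routes = []
--     prev = 0
--     for z in zeros:
--         routes.append(solution[prev:z])
--         prev = z + 1
--     return routes
-- ===== Notes on version B (the rewrite author's own statement) =====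
-- stated objective: simpler
-- what changed: B first collects the indices of all zeros, then emits one slice solution[prev:z] per zero, instead of A's single pass maintaining a mutable current-route accumulator flushed at each zero.
import Mathlib
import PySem

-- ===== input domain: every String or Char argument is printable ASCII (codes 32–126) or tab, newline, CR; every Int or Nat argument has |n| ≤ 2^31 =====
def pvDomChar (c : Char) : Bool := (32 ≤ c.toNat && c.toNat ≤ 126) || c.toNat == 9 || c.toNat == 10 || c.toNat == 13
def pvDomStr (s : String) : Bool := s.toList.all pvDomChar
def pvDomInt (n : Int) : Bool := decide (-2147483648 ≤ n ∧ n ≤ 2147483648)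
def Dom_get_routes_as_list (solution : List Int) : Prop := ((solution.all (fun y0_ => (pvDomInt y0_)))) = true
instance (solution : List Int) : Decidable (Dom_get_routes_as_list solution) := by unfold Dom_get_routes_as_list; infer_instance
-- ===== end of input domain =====

-- B replaces A's one-pass mutable-accumulator loop by collecting the zero positions and
-- slicing between consecutive split points (objective: simpler decomposition; same cost).

-- ===== PORT A =====
-- for i in range(len(solution)): index i is always in range, so pyGetD with default 0 is exact
def get_routes_as_list (solution : List Int) : List (List Int) :=
  ((PySem.List.pyRange 0 (PySem.List.len solution) 1).foldl
    (fun (st : List (List Int) × List Int) i =>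
      if PySem.List.pyGetD solution i 0 = 0 then (st.1 ++ [st.2], [])
      else (st.1, st.2 ++ [PySem.List.pyGetD solution i 0]))
    ([], [])).1

-- ===== PORT B =====
def get_routes_as_list_alt (solution : List Int) : List (List Int) :=
  let zeros := ((PySem.List.enumerate solution 0).filter (fun p => p.2 == 0)).map Prod.fst
  (zeros.foldl
    (fun (st : List (List Int) × Int) z =>
      (st.1 ++ [PySem.List.slice solution (some st.2) (some z)], z + 1))
    ([], 0)).1

-- ===== PRECONDITION & SPEC =====
def Spec_get_routes_as_list (solution : List Int) (out : List (List Int)) : Prop := out = get_routes_as_list_alt solution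
instance (solution : List Int) (out : List (List Int)) : Decidable (Spec_get_routes_as_list solution out) := by unfold Spec_get_routes_as_list; infer_instance

-- ===== CLAIM (what is proved, stated in full; the proofs are below) =====
def Claim_equal_get_routes_as_list : Prop := ∀ (solution : List Int), Dom_get_routes_as_list solution → Spec_get_routes_as_list solution (get_routes_as_list solution)

-- ===== LEMMAS AND PROOFS =====

-- the common split function both ports compute
def pvSplit : List Int → List Int → List (List Int)
  | [], _ => []
  | x :: xs, r => if x = 0 then r :: pvSplit xs [] else pvSplit xs (r ++ [x])

def pvStepA (st : List (List Int) × List Int) (x : Int) : List (List Int) × List Int :=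
  if x = 0 then (st.1 ++ [st.2], []) else (st.1, st.2 ++ [x])

lemma foldA_eq (xs : List Int) : ∀ (v : List (List Int)) (r : List Int),
    (xs.foldl pvStepA (v, r)).1 = v ++ pvSplit xs r := by
  induction xs with
  | nil => intro v r; simp [pvSplit]
  | cons x xs ih =>
    intro v r
    by_cases hx : x = 0 <;> simp [pvStepA, pvSplit, hx, ih]

lemma get_routes_as_list_eq (solution : List Int) :
    get_routes_as_list solution = pvSplit solution [] := by
  unfold get_routes_as_list
  have hfun : (fun (st : List (List Int) × List Int) i =>
      if PySem.List.pyGetD solution i 0 = 0 then (st.1 ++ [st.2], [])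
      else (st.1, st.2 ++ [PySem.List.pyGetD solution i 0]))
      = fun st i => pvStepA st (PySem.List.pyGetD solution i 0) := by
    funext st i; simp [pvStepA]
  rw [hfun, PySem.List.foldl_pyRange_zero_pyGetD solution 0 pvStepA ([], [])]
  simpa using foldA_eq solution [] []

def pvZerosIdx (xs : List Int) (s : Int) : List Int :=
  ((PySem.List.enumerate xs s).filter (fun p => p.2 == 0)).map Prod.fst

def pvStepB (full : List Int) (st : List (List Int) × Int) (z : Int) : List (List Int) × Int :=
  (st.1 ++ [PySem.List.slice full (some st.2) (some z)], z + 1)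

lemma zerosIdx_nil (s : Int) : pvZerosIdx [] s = [] := by
  simp [pvZerosIdx, PySem.List.enumerate_nil]

lemma zerosIdx_cons (x : Int) (xs : List Int) (s : Int) :
    pvZerosIdx (x :: xs) s =
      if x = 0 then s :: pvZerosIdx xs (s + 1) else pvZerosIdx xs (s + 1) := by
  by_cases hx : x = 0 <;> simp [pvZerosIdx, PySem.List.enumerate_cons, hx]

lemma foldB_eq (tail : List Int) : ∀ (pre r : List Int) (out : List (List Int)),
    ((pvZerosIdx tail ((pre ++ r).length : Int)).foldl (pvStepB (pre ++ r ++ tail))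
      (out, (pre.length : Int))).1 = out ++ pvSplit tail r := by
  induction tail with
  | nil => intro pre r out; simp [zerosIdx_nil, pvSplit]
  | cons x xs ih =>
    intro pre r out
    rw [zerosIdx_cons]
    by_cases hx : x = 0
    · rw [if_pos hx, List.foldl_cons]
      have hslice : PySem.List.slice (pre ++ r ++ x :: xs)
          (some (pre.length : Int)) (some ((pre ++ r).length : Int)) = r := by
        rw [show ((pre ++ r).length : Int) = ((pre.length : Nat) : Int) + ((r.length : Nat) : Int) by simp,
            PySem.List.slice_natCast_add,
            show pre ++ r ++ x :: xs = pre ++ (r ++ x :: xs) by simp,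
            List.drop_left, List.take_left]
      have h2 := ih (pre ++ r ++ [x]) [] (out ++ [r])
      simp only [List.append_nil] at h2
      simp only [pvStepB, hslice]
      rw [show ((pre ++ r).length : Int) + 1 = (((pre ++ r ++ [x]).length : Nat) : Int) by simp; omega,
          show pre ++ r ++ x :: xs = (pre ++ r ++ [x]) ++ xs by simp]
      simpa [pvSplit, hx] using h2
    · rw [if_neg hx]
      have h2 := ih pre (r ++ [x]) out
      rw [show pre ++ (r ++ [x]) ++ xs = pre ++ r ++ x :: xs by simp] at h2
      rw [show (((pre ++ (r ++ [x])).length : Nat) : Int) = ((pre ++ r).length : Int) + 1 by simp; omega] at h2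
      simpa [pvSplit, hx] using h2

lemma get_routes_as_list_alt_eq (solution : List Int) :
    get_routes_as_list_alt solution = pvSplit solution [] := by
  have := foldB_eq solution [] [] []
  simpa [get_routes_as_list_alt, pvZerosIdx, pvStepB] using this

-- ===== VERDICT (by name: the statement is the Claim_ definition above) =====
theorem get_routes_as_list_spec : Claim_equal_get_routes_as_list := by
  intro solution _
  unfold Spec_get_routes_as_list
  rw [get_routes_as_list_eq, get_routes_as_list_alt_eq]
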